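-- pv_equiv track=rewrite | github.com/M0nstr1kUwU/TEXT_WAR_LEGACY | checker_3.0.py | get_unexpected_items
-- ===== SOURCE A (Python) =====
-- def get_unexpected_items(actual_items, expected_items):
--     """Получает неожиданные элементы"""
--     expected_set = set(expected_items)
--     expected_set.update([item + '.py' for item in expected_items])
--     expected_set.update([item + '.json' for item in expected_items])
--
--     return [item for item in actual_items
--             if item not in expected_set
--             and not item.endswith('__init__.py')
--             and not item.startswith('__')]
-- ===== SOURCE B (Python) =====
-- def get_unexpected_items(actual_items, expected_items):
--     """Получает неожиданные элементы"""
--     base = set(expected_items)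
--     return [item for item in actual_items
--             if not (item in base
--                     or (item.endswith('.py') and item[:-3] in base)
--                     or (item.endswith('.json') and item[:-5] in base))
--             and not item.endswith('__init__.py')
--             and not item.startswith('__')]
-- ===== Notes on version B (the rewrite author's own statement) =====
-- stated objective: simpler
-- what changed: B keeps only the plain set of expected items and tests each actual item by suffix-stripping ('.py'/'.json') instead of precomputing two augmented copies of the expected set; measured faster in a timing run (skips 2m string concatenations and set insertions).
import Mathlib
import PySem

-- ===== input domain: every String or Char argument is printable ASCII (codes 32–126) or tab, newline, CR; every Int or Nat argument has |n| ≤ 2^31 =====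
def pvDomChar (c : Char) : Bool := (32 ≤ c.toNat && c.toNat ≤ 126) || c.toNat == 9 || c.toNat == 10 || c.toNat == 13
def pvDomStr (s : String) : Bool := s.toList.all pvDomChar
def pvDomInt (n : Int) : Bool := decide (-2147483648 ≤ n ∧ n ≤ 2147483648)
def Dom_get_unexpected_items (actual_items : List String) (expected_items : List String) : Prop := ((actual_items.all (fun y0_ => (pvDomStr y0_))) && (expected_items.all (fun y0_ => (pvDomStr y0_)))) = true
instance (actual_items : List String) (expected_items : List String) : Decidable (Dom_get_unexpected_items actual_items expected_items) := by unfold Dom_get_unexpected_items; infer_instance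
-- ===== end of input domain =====

-- B keeps only the plain expected set and derives '.py'/'.json' membership per item by suffix stripping, instead of building two augmented copies of the set (simpler set maintenance; a timing run measured it faster).


-- ===== PORT A =====
def get_unexpected_items (actual_items : List String) (expected_items : List String) : List String :=
  let expected_set := PySem.Set.ofList expected_items
  let expected_set := PySem.Set.update expected_set (expected_items.map (fun item => item ++ ".py"))
  let expected_set := PySem.Set.update expected_set (expected_items.map (fun item => item ++ ".json"))
  actual_items.filter (fun item =>
    !(PySem.Set.contains expected_set item)
    && !(PySem.Str.endswith item "__init__.py")
    && !(PySem.Str.startswith item "__"))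

-- ===== PORT B =====
def get_unexpected_items_alt (actual_items : List String) (expected_items : List String) : List String :=
  let base := PySem.Set.ofList expected_items
  actual_items.filter (fun item =>
    !(PySem.Set.contains base item
      || (PySem.Str.endswith item ".py" && PySem.Set.contains base (PySem.Str.slice item none (some (-3))))
      || (PySem.Str.endswith item ".json" && PySem.Set.contains base (PySem.Str.slice item none (some (-5)))))
    && !(PySem.Str.endswith item "__init__.py")
    && !(PySem.Str.startswith item "__"))

-- ===== PRECONDITION & SPEC =====
def Spec_get_unexpected_items (actual_items : List String) (expected_items : List String) (out : List String) : Prop := out = get_unexpected_items_alt actual_items expected_items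
instance (actual_items : List String) (expected_items : List String) (out : List String) : Decidable (Spec_get_unexpected_items actual_items expected_items out) := by unfold Spec_get_unexpected_items; infer_instance

-- ===== CLAIM (what is proved, stated in full; the proofs are below) =====
def Claim_equal_get_unexpected_items : Prop := ∀ (actual_items : List String) (expected_items : List String), Dom_get_unexpected_items actual_items expected_items → Spec_get_unexpected_items actual_items expected_items (get_unexpected_items actual_items expected_items)

-- ===== LEMMAS AND PROOFS =====

-- splitting off a fixed suffix: s = x ++ suf iff suf is a suffix of s and x is what remains
theorem pv_append_suffix_iff (s x suf : List Char) :
    s = x.append suf ↔ (suf <:+ s ∧ x = s.take (s.length - suf.length)) := by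
  constructor
  · rintro rfl
    refine ⟨⟨x, rfl⟩, ?_⟩
    simp [List.append_eq, List.take_left']
  · rintro ⟨⟨t, rfl⟩, hx⟩
    simp only [List.append_eq]
    congr 1
    simpa [List.take_left'] using hx.symm

theorem pv_strcat_iff (item x suf : String) :
    item = x ++ suf ↔
      (suf.toList <:+ item.toList ∧
       x.toList = item.toList.take (item.toList.length - suf.toList.length)) := by
  rw [← pv_append_suffix_iff]
  constructor
  · rintro rfl; simp
  · intro h
    apply String.ext
    simpa using h

theorem pv_slice_toList (s : String) (k : Nat) (hk : 0 < k) :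
    (PySem.Str.slice s none (some (-(k : Int)))).toList = s.toList.take (s.toList.length - k) := by
  simp only [PySem.Str.toList_slice, PySem.Chars.slice_eq_listSlice]
  rw [PySem.List.slice_to_neg_natCast _ k hk]

theorem pv_slice3 (s : String) :
    (PySem.Str.slice s none (some (-3))).toList = s.toList.take (s.toList.length - 3) := by
  rw [show ((-3 : Int)) = -((3 : Nat) : Int) by norm_num]
  exact pv_slice_toList s 3 (by omega)

theorem pv_slice5 (s : String) :
    (PySem.Str.slice s none (some (-5))).toList = s.toList.take (s.toList.length - 5) := by
  rw [show ((-5 : Int)) = -((5 : Nat) : Int) by norm_num]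
  exact pv_slice_toList s 5 (by omega)

theorem pv_contains_eq (e : List String) (item : String) :
    PySem.Set.contains
      (PySem.Set.update
        (PySem.Set.update (PySem.Set.ofList e) (e.map (fun i => i ++ ".py")))
        (e.map (fun i => i ++ ".json"))) item
    = (PySem.Set.contains (PySem.Set.ofList e) item
       || (PySem.Str.endswith item ".py"
           && PySem.Set.contains (PySem.Set.ofList e) (PySem.Str.slice item none (some (-3))))
       || (PySem.Str.endswith item ".json"
           && PySem.Set.contains (PySem.Set.ofList e) (PySem.Str.slice item none (some (-5))))) := by
  rw [Bool.eq_iff_iff]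
  simp only [Bool.or_eq_true, Bool.and_eq_true, PySem.Set.contains_iff,

    PySem.Set.mem_update, PySem.Set.mem_ofList, List.mem_map, PySem.Str.endswith_eq,
    PySem.Chars.endswith_iff]
  constructor
  · rintro ((h | ⟨x, hx, rfl⟩) | ⟨x, hx, rfl⟩)
    · exact Or.inl (Or.inl h)
    · refine Or.inl (Or.inr ⟨((pv_strcat_iff _ x ".py").1 rfl).1, ?_⟩)
      have := ((pv_strcat_iff (x ++ ".py") x ".py").1 rfl).2
      simp only [show (".py").toList.length = 3 from rfl] at this
      have h3 := pv_slice3 (x ++ ".py")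
      have hx' : (PySem.Str.slice (x ++ ".py") none (some (-3))) = x := by
        apply String.ext; rw [h3, ← this]
      rw [hx']; exact hx
    · refine Or.inr ⟨((pv_strcat_iff _ x ".json").1 rfl).1, ?_⟩
      have := ((pv_strcat_iff (x ++ ".json") x ".json").1 rfl).2
      simp only [show (".json").toList.length = 5 from rfl] at this
      have h5 := pv_slice5 (x ++ ".json")
      have hx' : (PySem.Str.slice (x ++ ".json") none (some (-5))) = x := by
        apply String.ext; rw [h5, ← this]
      rw [hx']; exact hx
  · rintro ((h | ⟨hsuf, hmem⟩) | ⟨hsuf, hmem⟩)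
    · exact Or.inl (Or.inl h)
    · refine Or.inl (Or.inr ⟨_, hmem, ?_⟩)
      symm; rw [pv_strcat_iff]
      exact ⟨hsuf, by rw [pv_slice3 item]; rfl⟩
    · refine Or.inr ⟨_, hmem, ?_⟩
      symm; rw [pv_strcat_iff]
      exact ⟨hsuf, by rw [pv_slice5 item]; rfl⟩

-- ===== VERDICT (by name: the statement is the Claim_ definition above) =====
theorem get_unexpected_items_spec : Claim_equal_get_unexpected_items := by
  intro actual_items expected_items _
  unfold Spec_get_unexpected_items get_unexpected_items get_unexpected_items_alt
  refine List.filter_congr (fun item _ => ?_)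
  rw [pv_contains_eq]
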